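-- pv_equiv track=rewrite | github.com/mikeparcewski/wicked-garden | scripts/migrate_capabilities.py | _add_tool_capabilities
-- ===== SOURCE A (Python) =====
-- def _add_tool_capabilities(content: str, capabilities: list[str]) -> str:
--     """Add tool-capabilities to an agent's frontmatter.
--
--     Inserts the tool-capabilities block after the allowed-tools line.
--     If tool-capabilities already exists, returns content unchanged.
--     """
--     if "tool-capabilities:" in content:
--         return content  # Already migrated
--
--     lines = content.split("\n")
--     insert_idx = None
--
--     # Find allowed-tools line in frontmatter
--     in_frontmatter = False
--     for i, line in enumerate(lines):
--         if line.strip() == "---":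
--             if not in_frontmatter:
--                 in_frontmatter = True
--                 continue
--             else:
--                 break  # End of frontmatter
--         if in_frontmatter and line.startswith("allowed-tools:"):
--             insert_idx = i + 1
--             break
--
--     if insert_idx is None:
--         # No allowed-tools found; insert before closing ---
--         for i, line in enumerate(lines):
--             if i > 0 and line.strip() == "---":
--                 insert_idx = i
--                 break
--
--     if insert_idx is None:
--         return content  # Can't find frontmatter
--
--     # Build the tool-capabilities block
--     cap_lines = ["tool-capabilities:"]
--     for cap in capabilities:
--         cap_lines.append(f"  - {cap}")
--
--     # Insert
--     result_lines = lines[:insert_idx] + cap_lines + lines[insert_idx:]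
--     return "\n".join(result_lines)
-- ===== SOURCE B (Python) =====
-- def _add_tool_capabilities(content: str, capabilities: list[str]) -> str:
--     """Single-pass re-implementation: one state machine over the lines records both
--     the allowed-tools insertion point and the fallback fence index."""
--     if "tool-capabilities:" in content:
--         return content
--
--     lines = content.split("\n")
--     allowed_idx = None   # i+1 of first allowed-tools line inside (open, unclosed) frontmatter
--     fence_idx = None     # first i > 0 whose stripped value is '---'
--     in_fm = False
--     closed = False
--     for i, line in enumerate(lines):
--         s = line.strip()
--         if fence_idx is None and i > 0 and s == "---":
--             fence_idx = i
--         if s == "---":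
--             if not in_fm:
--                 in_fm = True
--             else:
--                 closed = True
--         elif (allowed_idx is None and in_fm and not closed
--               and line.startswith("allowed-tools:")):
--             allowed_idx = i + 1
--
--     insert_idx = allowed_idx if allowed_idx is not None else fence_idx
--     if insert_idx is None:
--         return content
--
--     block = ["tool-capabilities:"] + [f"  - {c}" for c in capabilities]
--     return "\n".join(lines[:insert_idx] + block + lines[insert_idx:])
-- ===== Notes on version B (the rewrite author's own statement) =====
-- stated objective: alternative
-- what changed: Replaces A's two sequential scans (one stateful frontmatter scan for allowed-tools, then a second full scan for the fallback fence) by a single pass that maintains a state machine recording both candidate insertion points at once, then picks between them.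
import Mathlib
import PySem

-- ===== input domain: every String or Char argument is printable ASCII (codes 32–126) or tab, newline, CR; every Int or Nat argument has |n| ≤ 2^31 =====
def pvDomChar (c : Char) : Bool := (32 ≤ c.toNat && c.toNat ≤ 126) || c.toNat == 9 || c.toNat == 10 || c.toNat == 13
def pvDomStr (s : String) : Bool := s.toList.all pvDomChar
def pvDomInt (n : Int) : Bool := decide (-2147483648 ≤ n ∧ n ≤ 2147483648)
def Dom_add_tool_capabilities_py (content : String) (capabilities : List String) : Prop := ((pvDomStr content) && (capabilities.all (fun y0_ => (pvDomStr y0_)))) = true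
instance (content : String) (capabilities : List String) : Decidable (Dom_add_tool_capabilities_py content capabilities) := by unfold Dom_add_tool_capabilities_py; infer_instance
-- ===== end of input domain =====

-- B replaces A's two sequential scans by one single-pass state machine recording both
-- candidate insertion points; same asymptotic cost (objective: alternative).


-- ===== PORT A =====

-- A's first loop: scan for an allowed-tools line inside the frontmatter, breaking at the closing fence.
def pvScanAllowed : List String → Nat → Bool → Option Nat
  | [], _, _ => none
  | l :: rest, i, infm =>
    if PySem.Str.strip l = "---" then
      if !infm then pvScanAllowed rest (i + 1) true
      else none  -- break: end of frontmatter
    else if infm && PySem.Str.startswith l "allowed-tools:" then some (i + 1)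
    else pvScanAllowed rest (i + 1) infm

-- A's second loop: first index i > 0 whose stripped line is '---'.
def pvScanFence : List String → Nat → Option Nat
  | [], _ => none
  | l :: rest, i =>
    if i > 0 && PySem.Str.strip l = "---" then some i
    else pvScanFence rest (i + 1)

def add_tool_capabilities_py (content : String) (capabilities : List String) : String :=
  if PySem.Str.isIn "tool-capabilities:" content then content
  else
    let lines := (PySem.Str.split? content "\n").getD []
    let insertIdx :=
      match pvScanAllowed lines 0 false with
      | some idx => some idx
      | none => pvScanFence lines 0
    match insertIdx with
    | none => content
    | some idx =>
      let capLines := "tool-capabilities:" :: capabilities.map (fun cap => "  - " ++ cap)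
      PySem.Str.join "\n" (lines.take idx ++ capLines ++ lines.drop idx)

-- ===== PORT B =====

-- B's single pass: state (in_fm, closed, allowed_idx, fence_idx) over the lines.
def pvScanBoth : List String → Nat → Bool → Bool → Option Nat → Option Nat → Option Nat × Option Nat
  | [], _, _, _, a, f => (a, f)
  | l :: rest, i, infm, closed, a, f =>
    let s := PySem.Str.strip l
    let f' := if f = none && i > 0 && s = "---" then some i else f
    if s = "---" then
      if !infm then pvScanBoth rest (i + 1) true closed a f'
      else pvScanBoth rest (i + 1) infm true a f'
    else if a = none && infm && !closed && PySem.Str.startswith l "allowed-tools:" then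
      pvScanBoth rest (i + 1) infm closed (some (i + 1)) f'
    else pvScanBoth rest (i + 1) infm closed a f'

def add_tool_capabilities_py_alt (content : String) (capabilities : List String) : String :=
  if PySem.Str.isIn "tool-capabilities:" content then content
  else
    let lines := (PySem.Str.split? content "\n").getD []
    let (allowedIdx, fenceIdx) := pvScanBoth lines 0 false false none none
    match allowedIdx.or fenceIdx with
    | none => content
    | some idx =>
      let block := "tool-capabilities:" :: capabilities.map (fun c => "  - " ++ c)
      PySem.Str.join "\n" (lines.take idx ++ block ++ lines.drop idx)

-- ===== PRECONDITION & SPEC =====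
def Spec_add_tool_capabilities_py (content : String) (capabilities : List String) (out : String) : Prop := out = add_tool_capabilities_py_alt content capabilities
instance (content : String) (capabilities : List String) (out : String) : Decidable (Spec_add_tool_capabilities_py content capabilities out) := by unfold Spec_add_tool_capabilities_py; infer_instance

-- ===== CLAIM (what is proved, stated in full; the proofs are below) =====
def Claim_equal_add_tool_capabilities_py : Prop := ∀ (content : String) (capabilities : List String), Dom_add_tool_capabilities_py content capabilities → Spec_add_tool_capabilities_py content capabilities (add_tool_capabilities_py content capabilities)

-- ===== LEMMAS AND PROOFS =====

-- The one-pass scan computes exactly the pair of A's two scans (accumulated behind the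
-- already-found values; a found closing fence disables the allowed-tools search).
theorem pvScanBoth_eq (lines : List String) :
    ∀ (i : Nat) (infm closed : Bool) (a f : Option Nat),
      pvScanBoth lines i infm closed a f =
        (a.or (if closed then none else pvScanAllowed lines i infm),
         f.or (pvScanFence lines i)) := by
  induction lines with
  | nil => intro i infm closed a f; cases closed <;> simp [pvScanBoth, pvScanAllowed, pvScanFence]
  | cons l rest ih =>
    intro i infm closed a f
    by_cases hs : PySem.Str.strip l = "---" <;>
      by_cases hst : PySem.Str.startswith l "allowed-tools:" = true <;>
      by_cases hi : i > 0 <;>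
      cases infm <;> cases closed <;> cases a <;> cases f <;>
      simp [pvScanBoth, pvScanAllowed, pvScanFence, hs, hst, hi, ih, Option.or] <;>
      (try (split_ifs <;> simp))

theorem add_tool_capabilities_eq (content : String) (capabilities : List String) :
    add_tool_capabilities_py content capabilities = add_tool_capabilities_py_alt content capabilities := by
  simp only [add_tool_capabilities_py, add_tool_capabilities_py_alt, pvScanBoth_eq,
    Bool.false_eq_true, if_false]
  split_ifs with h
  · rfl
  · cases ha : pvScanAllowed ((PySem.Str.split? content "\n").getD []) 0 false with
    | some idx => simp [ha, Option.or]
    | none =>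
      cases hf : pvScanFence ((PySem.Str.split? content "\n").getD []) 0 with
      | none => simp [ha, hf, Option.or]
      | some idx => simp [ha, hf, Option.or]

-- ===== VERDICT (by name: the statement is the Claim_ definition above) =====
theorem add_tool_capabilities_py_spec : Claim_equal_add_tool_capabilities_py := by
  intro content capabilities _
  unfold Spec_add_tool_capabilities_py
  exact (add_tool_capabilities_eq content capabilities)
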